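-- pv_equiv track=rewrite | github.com/burconsult/NMIAI26 | challenges/astar-island/run.py | allocate_seed_budgets_with_template
-- ===== SOURCE A (Python) =====
-- SEED_BUDGET_TEMPLATE_5X50 = (14, 12, 8, 8, 8)
--
-- def allocate_seed_budgets_with_template(total_budget, seed_scores, coverage_queries, ranked_template=None):
--     """Allocate query budget, optionally forcing a rank-ordered template."""
--     seeds = len(seed_scores)
--     if seeds == 0 or total_budget <= 0:
--         return [0] * seeds
--
--     order = sorted(range(seeds), key=lambda i: (seed_scores[i], -i), reverse=True)
--
--     if ranked_template is None and seeds == 5 and total_budget == 50 and coverage_queries == 9: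
--         ranked_template = SEED_BUDGET_TEMPLATE_5X50
--
--     if ranked_template is not None:
--         ranked_template = tuple(int(v) for v in ranked_template)
--         if len(ranked_template) == seeds and sum(ranked_template) == total_budget:
--             budgets = [0] * seeds
--             for rank, seed_idx in enumerate(order):
--                 budgets[seed_idx] = ranked_template[rank]
--             return budgets
--
--     if seeds == 5 and total_budget == 50 and coverage_queries == 9:
--         budgets = [0] * seeds
--         for rank, seed_idx in enumerate(order):
--             budgets[seed_idx] = SEED_BUDGET_TEMPLATE_5X50[rank]
--         return budgets
--
--     if total_budget >= seeds * coverage_queries: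
--         budgets = [coverage_queries] * seeds
--         extra = total_budget - seeds * coverage_queries
--         for i in range(extra):
--             budgets[order[i % seeds]] += 1
--         return budgets
--
--     # Fair fallback when we cannot fully cover all seeds.
--     budgets = [total_budget // seeds] * seeds
--     for i in range(total_budget % seeds):
--         budgets[order[i]] += 1
--     return budgets
-- ===== SOURCE B (Python) =====
-- SEED_BUDGET_TEMPLATE_5X50 = (14, 12, 8, 8, 8)
--
-- def allocate_seed_budgets_with_template(total_budget, seed_scores, coverage_queries, ranked_template=None):
--     """Allocate query budget; extra queries distributed by divmod instead of a per-query loop."""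
--     n = len(seed_scores)
--     if n == 0 or total_budget <= 0:
--         return [0] * n
--     order = sorted(range(n), key=lambda i: (seed_scores[i], -i), reverse=True)
--     special = (n == 5 and total_budget == 50 and coverage_queries == 9)
--     amounts = None
--     if ranked_template is not None:
--         t = [int(v) for v in ranked_template]
--         if len(t) == n and sum(t) == total_budget:
--             amounts = t
--     elif special:
--         amounts = list(SEED_BUDGET_TEMPLATE_5X50)
--     if amounts is None:
--         if special:
--             amounts = list(SEED_BUDGET_TEMPLATE_5X50)
--         elif total_budget >= n * coverage_queries:
--             q, r = divmod(total_budget - n * coverage_queries, n)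
--             amounts = [coverage_queries + q + (1 if rank < r else 0) for rank in range(n)]
--         else:
--             q, r = divmod(total_budget, n)
--             amounts = [q + (1 if rank < r else 0) for rank in range(n)]
--     budgets = [0] * n
--     for rank, idx in enumerate(order):
--         budgets[idx] = amounts[rank]
--     return budgets
-- ===== Notes on version B (the rewrite author's own statement) =====
-- stated objective: alternative
-- what changed: A distributes the extra/remainder queries by looping once per extra query (budgets[order[i % n]] += 1 for i in range(extra)); B computes each rank's share in closed form with divmod (full cycles plus one extra for the first remainder ranks) and fills the budgets with a single scatter over the ranking.
import Mathlib
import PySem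

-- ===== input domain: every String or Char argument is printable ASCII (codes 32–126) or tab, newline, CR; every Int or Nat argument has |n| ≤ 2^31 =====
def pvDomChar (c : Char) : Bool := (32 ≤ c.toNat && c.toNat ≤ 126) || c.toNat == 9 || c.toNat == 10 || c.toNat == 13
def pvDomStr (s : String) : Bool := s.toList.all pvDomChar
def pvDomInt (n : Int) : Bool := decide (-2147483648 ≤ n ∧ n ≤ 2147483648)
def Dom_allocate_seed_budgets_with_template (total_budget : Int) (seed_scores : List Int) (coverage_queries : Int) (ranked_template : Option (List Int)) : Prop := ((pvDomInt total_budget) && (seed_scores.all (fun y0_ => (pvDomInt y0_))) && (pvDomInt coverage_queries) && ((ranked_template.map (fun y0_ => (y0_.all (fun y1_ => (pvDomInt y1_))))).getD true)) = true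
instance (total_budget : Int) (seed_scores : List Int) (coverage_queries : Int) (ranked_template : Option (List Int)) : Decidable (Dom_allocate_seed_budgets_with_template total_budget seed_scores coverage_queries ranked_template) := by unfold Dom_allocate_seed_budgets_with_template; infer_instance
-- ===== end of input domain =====

-- B replaces A's one-query-at-a-time distribution loop by a divmod closed form per rank
-- followed by a single scatter along the ranking (alternative algorithm, same observable value).

-- shared module constant SEED_BUDGET_TEMPLATE_5X50
def pvTemplate : List Int := [14, 12, 8, 8, 8]

-- shared line 'order = sorted(range(seeds), key=lambda i: (seed_scores[i], -i), reverse=True)'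
def pvOrder (seed_scores : List Int) : List Int :=
  PySem.List.sorted2 (PySem.List.pyRange 0 (seed_scores.length : Int))
    (fun i => PySem.List.pyGetD seed_scores i 0) (fun i => -i) true

-- ===== PORT A =====
-- the code of A after the ranked_template branch ('if seeds == 5 and …' onwards)
def pvA_rest (total_budget : Int) (seed_scores : List Int) (coverage_queries : Int) (order : List Int) : List Int :=
  if seed_scores.length = 5 ∧ total_budget = 50 ∧ coverage_queries = 9 then
    (PySem.List.enumerate order 0).foldl
      (fun b p => PySem.List.pySetD b p.2 (PySem.List.pyGetD pvTemplate p.1 0))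
      (List.replicate seed_scores.length 0)
  else if (seed_scores.length : Int) * coverage_queries ≤ total_budget then
    (PySem.List.pyRange 0 (total_budget - (seed_scores.length : Int) * coverage_queries)).foldl
      (fun b i =>
        PySem.List.pySetD b (PySem.List.pyGetD order (PySem.Int.mod i (seed_scores.length : Int)) 0)
          (PySem.List.pyGetD b (PySem.List.pyGetD order (PySem.Int.mod i (seed_scores.length : Int)) 0) 0 + 1))
      (List.replicate seed_scores.length coverage_queries)
  else
    (PySem.List.pyRange 0 (PySem.Int.mod total_budget (seed_scores.length : Int))).foldl
      (fun b i =>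
        PySem.List.pySetD b (PySem.List.pyGetD order i 0)
          (PySem.List.pyGetD b (PySem.List.pyGetD order i 0) 0 + 1))
      (List.replicate seed_scores.length (PySem.Int.floordiv total_budget (seed_scores.length : Int)))

-- the 'if ranked_template is not None' block of A (rt' is ranked_template after the 5x50 default)
def pvA_branch (total_budget : Int) (seed_scores : List Int) (coverage_queries : Int) (rt' : Option (List Int)) : List Int :=
  match rt' with
  | some t =>
      if t.length = seed_scores.length ∧ t.sum = total_budget then
        (PySem.List.enumerate (pvOrder seed_scores) 0).foldl
          (fun b p => PySem.List.pySetD b p.2 (PySem.List.pyGetD t p.1 0))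
          (List.replicate seed_scores.length 0)
      else pvA_rest total_budget seed_scores coverage_queries (pvOrder seed_scores)
  | none => pvA_rest total_budget seed_scores coverage_queries (pvOrder seed_scores)

def allocate_seed_budgets_with_template (total_budget : Int) (seed_scores : List Int) (coverage_queries : Int) (ranked_template : Option (List Int)) : List Int :=
  if seed_scores.length = 0 ∨ total_budget ≤ 0 then
    List.replicate seed_scores.length 0
  else
    pvA_branch total_budget seed_scores coverage_queries
      (if ranked_template = none ∧ seed_scores.length = 5 ∧ total_budget = 50 ∧ coverage_queries = 9 then some pvTemplate else ranked_template)

-- ===== PORT B =====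
-- B: 'amounts' per rank; template branch (int(v) is the identity on int, list(tuple) on a list)
def pvB_template (total_budget : Int) (seed_scores : List Int) (coverage_queries : Int) (ranked_template : Option (List Int)) : Option (List Int) :=
  match ranked_template with
  | some t => if t.length = seed_scores.length ∧ t.sum = total_budget then some t else none
  | none =>
      if seed_scores.length = 5 ∧ total_budget = 50 ∧ coverage_queries = 9 then some pvTemplate
      else none

-- B: the per-rank amounts, closed form via divmod
def pvB_amounts (total_budget : Int) (seed_scores : List Int) (coverage_queries : Int) (ranked_template : Option (List Int)) : List Int :=
  match pvB_template total_budget seed_scores coverage_queries ranked_template with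
  | some a => a
  | none =>
      if seed_scores.length = 5 ∧ total_budget = 50 ∧ coverage_queries = 9 then pvTemplate
      else if (seed_scores.length : Int) * coverage_queries ≤ total_budget then
        (PySem.List.pyRange 0 (seed_scores.length : Int)).map
          (fun rank => coverage_queries
            + PySem.Int.floordiv (total_budget - (seed_scores.length : Int) * coverage_queries) (seed_scores.length : Int)
            + if rank < PySem.Int.mod (total_budget - (seed_scores.length : Int) * coverage_queries) (seed_scores.length : Int) then 1 else 0)
      else
        (PySem.List.pyRange 0 (seed_scores.length : Int)).map
          (fun rank => PySem.Int.floordiv total_budget (seed_scores.length : Int)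
            + if rank < PySem.Int.mod total_budget (seed_scores.length : Int) then 1 else 0)

def allocate_seed_budgets_with_template_alt (total_budget : Int) (seed_scores : List Int) (coverage_queries : Int) (ranked_template : Option (List Int)) : List Int :=
  if seed_scores.length = 0 ∨ total_budget ≤ 0 then
    List.replicate seed_scores.length 0
  else
    (PySem.List.enumerate (pvOrder seed_scores) 0).foldl
      (fun b p => PySem.List.pySetD b p.2 (PySem.List.pyGetD (pvB_amounts total_budget seed_scores coverage_queries ranked_template) p.1 0))
      (List.replicate seed_scores.length 0)

-- ===== PRECONDITION & SPEC =====
def Spec_allocate_seed_budgets_with_template (total_budget : Int) (seed_scores : List Int) (coverage_queries : Int) (ranked_template : Option (List Int)) (out : List Int) : Prop := out = allocate_seed_budgets_with_template_alt total_budget seed_scores coverage_queries ranked_template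
instance (total_budget : Int) (seed_scores : List Int) (coverage_queries : Int) (ranked_template : Option (List Int)) (out : List Int) : Decidable (Spec_allocate_seed_budgets_with_template total_budget seed_scores coverage_queries ranked_template out) := by unfold Spec_allocate_seed_budgets_with_template; infer_instance

-- ===== CLAIM (what is proved, stated in full; the proofs are below) =====
def Claim_equal_allocate_seed_budgets_with_template : Prop := ∀ (total_budget : Int) (seed_scores : List Int) (coverage_queries : Int) (ranked_template : Option (List Int)), Dom_allocate_seed_budgets_with_template total_budget seed_scores coverage_queries ranked_template → Spec_allocate_seed_budgets_with_template total_budget seed_scores coverage_queries ranked_template (allocate_seed_budgets_with_template total_budget seed_scores coverage_queries ranked_template)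

-- ===== LEMMAS AND PROOFS =====

-- scatter loop: 'for rank, idx in enumerate(order): budgets[idx] = g(rank)', pointwise
lemma pv_scatter_spec (amounts : List Int) (order : List Int) (s : Int) (B0 : List Int)
    (hmem : ∀ x ∈ order, 0 ≤ x ∧ x.toNat < B0.length) (hnd : order.Nodup) :
    ((PySem.List.enumerate order s).foldl (fun b p => PySem.List.pySetD b p.2 (PySem.List.pyGetD amounts p.1 0)) B0).length = B0.length ∧
    ∀ (j : ℕ), j < B0.length →
      ((PySem.List.enumerate order s).foldl (fun b p => PySem.List.pySetD b p.2 (PySem.List.pyGetD amounts p.1 0)) B0).getD j 0 =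
        if (j : Int) ∈ order then PySem.List.pyGetD amounts (s + (order.idxOf (j : Int) : Int)) 0 else B0.getD j 0 := by
  induction order generalizing s B0 with
  | nil => simp [PySem.List.enumerate_nil]
  | cons x l ih =>
    obtain ⟨hx0, hxlt⟩ := hmem x (List.mem_cons_self)
    rw [PySem.List.enumerate_cons]
    simp only [List.foldl_cons]
    have hset : PySem.List.pySetD B0 x (PySem.List.pyGetD amounts s 0) = B0.set x.toNat (PySem.List.pyGetD amounts s 0) :=
      PySem.List.pySetD_of_nonneg B0 (PySem.List.pyGetD amounts s 0) hx0
    have hlen1 : (PySem.List.pySetD B0 x (PySem.List.pyGetD amounts s 0)).length = B0.length := PySem.List.length_pySetD _ _ _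
    have hmem' : ∀ y ∈ l, 0 ≤ y ∧ y.toNat < (PySem.List.pySetD B0 x (PySem.List.pyGetD amounts s 0)).length := by
      intro y hy; rw [hlen1]; exact hmem y (List.mem_cons_of_mem _ hy)
    obtain ⟨ihlen, ihpt⟩ := ih (s + 1) (PySem.List.pySetD B0 x (PySem.List.pyGetD amounts s 0)) hmem' hnd.of_cons
    refine ⟨ihlen.trans hlen1, ?_⟩
    intro j hj
    rw [ihpt j (by omega)]
    by_cases hjl : (j : Int) ∈ l
    · have hjx : (j : Int) ≠ x := by
        intro he; exact (List.nodup_cons.mp hnd).1 (he ▸ hjl)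
      rw [if_pos hjl, if_pos (List.mem_cons_of_mem _ hjl)]
      rw [List.idxOf_cons_ne _ (fun h => hjx (by simpa using h.symm))]
      have harg : s + ((List.idxOf ((j : Int)) l + 1 : ℕ) : Int) = s + 1 + ((List.idxOf ((j : Int)) l : ℕ) : Int) := by
        push_cast; ring
      rw [harg]
    · by_cases hjx : (j : Int) = x
      · have hxj : x.toNat = j := by omega
        rw [if_neg hjl, if_pos (by simp [hjx])]
        have : (x :: l).idxOf (j : Int) = 0 := by
          simp [hjx, List.idxOf_cons_self]
        rw [this, hset]
        rw [List.getD_eq_getElem _ _ (by simpa using hj), List.getElem_set]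
        simp [hxj]
      · rw [if_neg hjl, if_neg (by simp [hjx, hjl])]
        rw [hset, List.getD_eq_getElem _ _ (by simpa using hj), List.getElem_set]
        have : x.toNat ≠ j := by omega
        rw [if_neg this, List.getD_eq_getElem _ _ hj]

-- increment loop: 'for i in idxs: budgets[t(i)] += 1', pointwise
lemma pv_inc_spec (t : Int → Int) (idxs : List Int) (B0 : List Int)
    (h : ∀ i ∈ idxs, 0 ≤ t i ∧ (t i).toNat < B0.length) :
    (idxs.foldl (fun b i => PySem.List.pySetD b (t i) (PySem.List.pyGetD b (t i) 0 + 1)) B0).length = B0.length ∧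
    ∀ (j : ℕ), j < B0.length →
      (idxs.foldl (fun b i => PySem.List.pySetD b (t i) (PySem.List.pyGetD b (t i) 0 + 1)) B0).getD j 0 =
        B0.getD j 0 + (idxs.countP (fun i => t i == (j : Int)) : Int) := by
  induction idxs generalizing B0 with
  | nil => simp
  | cons i l ih =>
    obtain ⟨ht0, htlt⟩ := h i (List.mem_cons_self)
    simp only [List.foldl_cons]
    have hset : PySem.List.pySetD B0 (t i) (PySem.List.pyGetD B0 (t i) 0 + 1)
        = B0.set (t i).toNat (B0.getD (t i).toNat 0 + 1) := by
      rw [PySem.List.pyGetD_of_nonneg _ _ ht0, PySem.List.pySetD_of_nonneg _ _ ht0]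
    have hlen1 : (PySem.List.pySetD B0 (t i) (PySem.List.pyGetD B0 (t i) 0 + 1)).length = B0.length :=
      PySem.List.length_pySetD _ _ _
    have hmem' : ∀ y ∈ l, 0 ≤ t y ∧ (t y).toNat < (PySem.List.pySetD B0 (t i) (PySem.List.pyGetD B0 (t i) 0 + 1)).length := by
      intro y hy; rw [hlen1]; exact h y (List.mem_cons_of_mem _ hy)
    obtain ⟨ihlen, ihpt⟩ := ih _ hmem'
    refine ⟨ihlen.trans hlen1, ?_⟩
    intro j hj
    rw [ihpt j (by omega), List.countP_cons]
    have hb1 : (PySem.List.pySetD B0 (t i) (PySem.List.pyGetD B0 (t i) 0 + 1)).getD j 0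
        = if (t i).toNat = j then B0.getD j 0 + 1 else B0.getD j 0 := by
      rw [hset, List.getD_eq_getElem _ _ (by simpa using hj), List.getElem_set]
      by_cases he : (t i).toNat = j
      · rw [if_pos he, if_pos he, he, List.getD_eq_getElem _ _ hj]
      · rw [if_neg he, if_neg he, List.getD_eq_getElem _ _ hj]
    rw [hb1]
    by_cases he : (t i).toNat = j
    · have hbe : (t i == (j : Int)) = true := by
        simp only [beq_iff_eq]; omega
      rw [if_pos he]
      simp only [hbe, if_true]
      push_cast
      ring
    · have hbe : (t i == (j : Int)) = false := by
        simp only [beq_eq_false_iff_ne, ne_eq]; omega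
      rw [if_neg he]
      simp only [hbe, Bool.false_eq_true, if_false]
      push_cast
      ring

-- how many i < m hit residue r mod n
lemma pv_cnt (n r : ℕ) (hn : 0 < n) (hr : r < n) (m : ℕ) :
    (List.range m).countP (fun i => i % n == r) = m / n + (if r < m % n then 1 else 0) := by
  induction m with
  | zero => simp
  | succ m ih =>
    rw [List.range_succ, List.countP_append, ih]
    have hdm : n * (m / n) + m % n = m := Nat.div_add_mod m n
    have hcomm : n * (m / n) = (m / n) * n := Nat.mul_comm _ _
    have hsn : m % n < n := Nat.mod_lt _ hn
    by_cases hlast : m % n + 1 = n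
    · have hm1 : m + 1 = (m / n + 1) * n := by ring_nf; omega
      have hdiv : (m + 1) / n = m / n + 1 := by rw [hm1, Nat.mul_div_cancel _ hn]
      have hmod : (m + 1) % n = 0 := by rw [hm1, Nat.mul_mod_left]
      rw [hdiv, hmod]
      by_cases hrs : r = m % n
      · simp [hrs]
      · have : (m % n == r) = false := by simp; omega
        simp only [List.countP_singleton, this]
        have h1 : r < m % n := by omega
        simp [h1]
    · have hm1 : m + 1 = (m % n + 1) + (m / n) * n := by omega
      have hdiv : (m + 1) / n = m / n := by
        rw [hm1, Nat.add_mul_div_right _ _ hn, Nat.div_eq_of_lt (by omega)]; omega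
      have hmod : (m + 1) % n = m % n + 1 := by
        rw [hm1, Nat.add_mul_mod_self_right, Nat.mod_eq_of_lt (by omega)]
      rw [hdiv, hmod]
      by_cases hrs : r = m % n
      · have : (m % n == r) = true := by simp [hrs]
        simp only [List.countP_singleton, this, if_true]
        have h1 : ¬ r < m % n := by omega
        have h2 : r < m % n + 1 := by omega
        simp [h1, h2]
      · have hb : (m % n == r) = false := by simp; omega
        simp only [List.countP_singleton, hb]
        by_cases h3 : r < m % n
        · have h4 : r < m % n + 1 := by omega
          simp [h3, h4]
        · have h4 : ¬ r < m % n + 1 := by omega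
          simp [h3, h4]

-- countP (== r0) over range m
lemma pv_count_eq (m r0 : ℕ) : (List.range m).countP (fun k => k == r0) = if r0 < m then 1 else 0 := by
  have := List.count_range (a := r0) (n := m)
  simpa [List.count] using this

-- reading order at position k hits j exactly at k = idxOf j
lemma pv_idx_char (order : List Int) (hnd : order.Nodup) (j : ℕ) (hj : (j : Int) ∈ order)
    (k : ℕ) (hk : k < order.length) :
    (order.getD k 0 == (j : Int)) = (k == order.idxOf (j : Int)) := by
  have hr : order.idxOf ((j : Int)) < order.length := List.idxOf_lt_length_of_mem hj
  have hgj : order[order.idxOf ((j : Int))] = (j : Int) := List.getElem_idxOf hr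
  rw [List.getD_eq_getElem _ _ hk]
  by_cases h : k = order.idxOf ((j : Int))
  · subst h; simp [hgj]
  · have hne : order[k] ≠ (j : Int) := by
      intro he
      exact h ((hnd.getElem_inj_iff).mp (he.trans hgj.symm))
    simp [hne, h]

-- facts about pvOrder: a permutation of range(n)
lemma pv_order_perm (ss : List Int) : (pvOrder ss).Perm (PySem.List.pyRange 0 (ss.length : Int)) :=
  PySem.List.sorted2_perm _ _ _ _

lemma pv_order_length (ss : List Int) : (pvOrder ss).length = ss.length := by
  rw [(pv_order_perm ss).length_eq, PySem.List.length_pyRange_one]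
  omega

lemma pv_order_nodup (ss : List Int) : (pvOrder ss).Nodup :=
  ((pv_order_perm ss).nodup_iff).mpr (PySem.List.nodup_pyRange_one _ _)

lemma pv_order_mem (ss : List Int) : ∀ x ∈ pvOrder ss, 0 ≤ x ∧ x < (ss.length : Int) := by
  intro x hx
  have := ((pv_order_perm ss).mem_iff).mp hx
  exact PySem.List.mem_pyRange_one.mp this

lemma pv_order_mem_nat (ss : List Int) : ∀ x ∈ pvOrder ss, 0 ≤ x ∧ x.toNat < ss.length := by
  intro x hx
  obtain ⟨h0, h1⟩ := pv_order_mem ss x hx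
  exact ⟨h0, by omega⟩

lemma pv_order_mem_of_lt (ss : List Int) (j : ℕ) (hj : j < ss.length) : ((j : Int)) ∈ pvOrder ss := by
  rw [(pv_order_perm ss).mem_iff, PySem.List.mem_pyRange_one]
  omega

-- the A-side increment loop (with i % n) equals the B-side closed-form scatter
lemma pv_covered_eq (ss : List Int) (base e : Int) (hn : 0 < ss.length) (he : 0 ≤ e) :
    (PySem.List.pyRange 0 e).foldl
      (fun b i =>
        PySem.List.pySetD b (PySem.List.pyGetD (pvOrder ss) (PySem.Int.mod i (ss.length : Int)) 0)
          (PySem.List.pyGetD b (PySem.List.pyGetD (pvOrder ss) (PySem.Int.mod i (ss.length : Int)) 0) 0 + 1))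
      (List.replicate ss.length base)
    = (PySem.List.enumerate (pvOrder ss) 0).foldl
        (fun b p => PySem.List.pySetD b p.2
          (PySem.List.pyGetD ((PySem.List.pyRange 0 (ss.length : Int)).map
            (fun rank => base + PySem.Int.floordiv e (ss.length : Int)
              + if rank < PySem.Int.mod e (ss.length : Int) then 1 else 0)) p.1 0))
        (List.replicate ss.length 0) := by
  set n := ss.length with hndef
  have hNpos : (0 : Int) < (n : Int) := by exact_mod_cast hn
  have hincmem : ∀ i ∈ PySem.List.pyRange 0 e,
      0 ≤ PySem.List.pyGetD (pvOrder ss) (PySem.Int.mod i (n : Int)) 0 ∧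
      (PySem.List.pyGetD (pvOrder ss) (PySem.Int.mod i (n : Int)) 0).toNat < (List.replicate n (base : Int)).length := by
    intro i _
    have hm0 : 0 ≤ PySem.Int.mod i (n : Int) := PySem.Int.mod_nonneg _ hNpos
    have hmlt : PySem.Int.mod i (n : Int) < (n : Int) := PySem.Int.mod_lt _ hNpos
    have hmem : PySem.List.pyGetD (pvOrder ss) (PySem.Int.mod i (n : Int)) 0 ∈ pvOrder ss := by
      rw [PySem.List.pyGetD_of_nonneg _ _ hm0]
      have hlt : (PySem.Int.mod i (n : Int)).toNat < (pvOrder ss).length := by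
        rw [pv_order_length]; omega
      rw [List.getD_eq_getElem _ _ hlt]
      exact List.getElem_mem _
    have := pv_order_mem_nat ss _ hmem
    simpa using this
  obtain ⟨hilen, hipt⟩ := pv_inc_spec _ (PySem.List.pyRange 0 e) (List.replicate n base) hincmem
  have hscmem : ∀ x ∈ pvOrder ss, 0 ≤ x ∧ x.toNat < (List.replicate n (0 : Int)).length := by
    intro x hx; simpa using pv_order_mem_nat ss x hx
  obtain ⟨hslen, hspt⟩ := pv_scatter_spec _ (pvOrder ss) 0 (List.replicate n 0) hscmem (pv_order_nodup ss)
  apply List.ext_getElem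
  · rw [hilen, hslen]; simp
  · intro j hj1 hj2
    have hjn : j < n := by rw [hilen] at hj1; simpa using hj1
    rw [← List.getD_eq_getElem _ 0 hj1, ← List.getD_eq_getElem _ 0 hj2]
    rw [hipt j (by simpa using hjn), hspt j (by simpa using hjn)]
    have hjmem := pv_order_mem_of_lt ss j hjn
    rw [if_pos hjmem]
    set r0 := (pvOrder ss).idxOf ((j : Int)) with hr0def
    have hr0lt : r0 < n := by
      have := List.idxOf_lt_length_of_mem hjmem
      rwa [pv_order_length] at this
    -- left side: count the hits
    have hcount : (PySem.List.pyRange 0 e).countP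
        (fun i => PySem.List.pyGetD (pvOrder ss) (PySem.Int.mod i (n : Int)) 0 == (j : Int))
        = e.toNat / n + (if r0 < e.toNat % n then 1 else 0) := by
      have hee : e = ((e.toNat : Nat) : Int) := by omega
      rw [hee, PySem.List.pyRange_zero_nat, List.countP_map]
      have hcongr : ∀ k ∈ List.range e.toNat,
          ((fun i => PySem.List.pyGetD (pvOrder ss) (PySem.Int.mod i (n : Int)) 0 == (j : Int)) ∘ (fun k : ℕ => (k : Int))) k
          = (fun k : ℕ => k % n == r0) k := by
        intro k _
        simp only [Function.comp_apply, PySem.Int.mod_natCast, PySem.List.pyGetD_natCast]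
        rw [pv_idx_char (pvOrder ss) (pv_order_nodup ss) j hjmem (k % n)
          (by rw [pv_order_length]; exact Nat.mod_lt _ hn)]
      rw [List.countP_congr (fun k hk => by rw [hcongr k hk])]
      exact pv_cnt n r0 hn hr0lt e.toNat
    rw [hcount]
    -- right side: the closed form at rank r0
    have hamt : PySem.List.pyGetD ((PySem.List.pyRange 0 ((n : Nat) : Int)).map
        (fun rank => base + PySem.Int.floordiv e (n : Int)
          + if rank < PySem.Int.mod e (n : Int) then 1 else 0)) ((0 : Int) + (r0 : Int)) 0
        = base + PySem.Int.floordiv e (n : Int) + if (r0 : Int) < PySem.Int.mod e (n : Int) then 1 else 0 := by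
      rw [zero_add]
      exact PySem.List.pyGetD_map_pyRange _ n r0 0 hr0lt
    rw [hamt]
    have hee : e = ((e.toNat : Nat) : Int) := by omega
    have hfd : PySem.Int.floordiv e (n : Int) = ((e.toNat / n : ℕ) : Int) := by
      conv_lhs => rw [hee]
      exact PySem.Int.floordiv_natCast _ _
    have hmd : PySem.Int.mod e (n : Int) = ((e.toNat % n : ℕ) : Int) := by
      conv_lhs => rw [hee]
      exact PySem.Int.mod_natCast _ _
    rw [hfd, hmd, List.getD_replicate _ hjn]
    by_cases hc : r0 < e.toNat % n
    · rw [if_pos hc, if_pos (by exact_mod_cast hc)]; push_cast; ring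
    · rw [if_neg hc, if_neg (by exact_mod_cast hc)]; push_cast; ring

-- the A-side fair-fallback loop equals the B-side closed-form scatter
lemma pv_fallback_eq (ss : List Int) (tb : Int) (hn : 0 < ss.length) :
    (PySem.List.pyRange 0 (PySem.Int.mod tb (ss.length : Int))).foldl
      (fun b i =>
        PySem.List.pySetD b (PySem.List.pyGetD (pvOrder ss) i 0)
          (PySem.List.pyGetD b (PySem.List.pyGetD (pvOrder ss) i 0) 0 + 1))
      (List.replicate ss.length (PySem.Int.floordiv tb (ss.length : Int)))
    = (PySem.List.enumerate (pvOrder ss) 0).foldl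
        (fun b p => PySem.List.pySetD b p.2
          (PySem.List.pyGetD ((PySem.List.pyRange 0 (ss.length : Int)).map
            (fun rank => PySem.Int.floordiv tb (ss.length : Int)
              + if rank < PySem.Int.mod tb (ss.length : Int) then 1 else 0)) p.1 0))
        (List.replicate ss.length 0) := by
  set n := ss.length with hndef
  have hNpos : (0 : Int) < (n : Int) := by exact_mod_cast hn
  set e := PySem.Int.mod tb (n : Int) with hedef
  have he0 : 0 ≤ e := PySem.Int.mod_nonneg _ hNpos
  have helt : e < (n : Int) := PySem.Int.mod_lt _ hNpos
  have hincmem : ∀ i ∈ PySem.List.pyRange 0 e,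
      0 ≤ PySem.List.pyGetD (pvOrder ss) i 0 ∧
      (PySem.List.pyGetD (pvOrder ss) i 0).toNat < (List.replicate n (PySem.Int.floordiv tb (n : Int))).length := by
    intro i hi
    obtain ⟨hi0, hilt⟩ := PySem.List.mem_pyRange_one.mp hi
    have hmem : PySem.List.pyGetD (pvOrder ss) i 0 ∈ pvOrder ss := by
      rw [PySem.List.pyGetD_of_nonneg _ _ hi0]
      have hlt : i.toNat < (pvOrder ss).length := by rw [pv_order_length]; omega
      rw [List.getD_eq_getElem _ _ hlt]
      exact List.getElem_mem _
    have := pv_order_mem_nat ss _ hmem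
    simpa using this
  obtain ⟨hilen, hipt⟩ := pv_inc_spec _ (PySem.List.pyRange 0 e)
    (List.replicate n (PySem.Int.floordiv tb (n : Int))) hincmem
  have hscmem : ∀ x ∈ pvOrder ss, 0 ≤ x ∧ x.toNat < (List.replicate n (0 : Int)).length := by
    intro x hx; simpa using pv_order_mem_nat ss x hx
  obtain ⟨hslen, hspt⟩ := pv_scatter_spec _ (pvOrder ss) 0 (List.replicate n 0) hscmem (pv_order_nodup ss)
  apply List.ext_getElem
  · rw [hilen, hslen]; simp
  · intro j hj1 hj2
    have hjn : j < n := by rw [hilen] at hj1; simpa using hj1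
    rw [← List.getD_eq_getElem _ 0 hj1, ← List.getD_eq_getElem _ 0 hj2]
    rw [hipt j (by simpa using hjn), hspt j (by simpa using hjn)]
    have hjmem := pv_order_mem_of_lt ss j hjn
    rw [if_pos hjmem]
    set r0 := (pvOrder ss).idxOf ((j : Int)) with hr0def
    have hr0lt : r0 < n := by
      have := List.idxOf_lt_length_of_mem hjmem
      rwa [pv_order_length] at this
    have hcount : (PySem.List.pyRange 0 e).countP
        (fun i => PySem.List.pyGetD (pvOrder ss) i 0 == (j : Int))
        = (if r0 < e.toNat then 1 else 0) := by
      have hee : e = ((e.toNat : Nat) : Int) := by omega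
      rw [hee, PySem.List.pyRange_zero_nat, List.countP_map]
      have hcongr : ∀ k ∈ List.range e.toNat,
          ((fun i => PySem.List.pyGetD (pvOrder ss) i 0 == (j : Int)) ∘ (fun k : ℕ => (k : Int))) k
          = (fun k : ℕ => k == r0) k := by
        intro k hk
        have hkn : k < n := by
          have := List.mem_range.mp hk
          omega
        simp only [Function.comp_apply, PySem.List.pyGetD_natCast]
        exact pv_idx_char (pvOrder ss) (pv_order_nodup ss) j hjmem k (by rw [pv_order_length]; omega)
      rw [List.countP_congr (fun k hk => by rw [hcongr k hk])]
      exact pv_count_eq e.toNat r0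
    rw [hcount]
    have hamt : PySem.List.pyGetD ((PySem.List.pyRange 0 ((n : Nat) : Int)).map
        (fun rank => PySem.Int.floordiv tb (n : Int)
          + if rank < PySem.Int.mod tb (n : Int) then 1 else 0)) ((0 : Int) + (r0 : Int)) 0
        = PySem.Int.floordiv tb (n : Int) + if (r0 : Int) < PySem.Int.mod tb (n : Int) then 1 else 0 := by
      rw [zero_add]
      exact PySem.List.pyGetD_map_pyRange _ n r0 0 hr0lt
    rw [hamt, List.getD_replicate _ hjn]
    rw [← hedef]
    by_cases hc : (r0 : Int) < e
    · rw [if_pos (by omega), if_pos hc]; ring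
    · rw [if_neg (by omega), if_neg hc]; ring

-- A's tail (pvA_rest) equals B's scatter of the non-template amounts
lemma pv_rest_eq (tb : Int) (ss : List Int) (cq : Int) (rt : Option (List Int))
    (hn : 0 < ss.length) (hbt : pvB_template tb ss cq rt = none) :
    pvA_rest tb ss cq (pvOrder ss)
    = (PySem.List.enumerate (pvOrder ss) 0).foldl
        (fun b p => PySem.List.pySetD b p.2
          (PySem.List.pyGetD (pvB_amounts tb ss cq rt) p.1 0))
        (List.replicate ss.length 0) := by
  unfold pvA_rest pvB_amounts
  rw [hbt]
  by_cases hsp : ss.length = 5 ∧ tb = 50 ∧ cq = 9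
  · rw [if_pos hsp, if_pos hsp]
  · rw [if_neg hsp, if_neg hsp]
    by_cases hcov : (ss.length : Int) * cq ≤ tb
    · rw [if_pos hcov, if_pos hcov]
      exact pv_covered_eq ss cq (tb - (ss.length : Int) * cq) hn (by omega)
    · rw [if_neg hcov, if_neg hcov]
      exact pv_fallback_eq ss tb hn

-- ===== VERDICT (by name: the statement is the Claim_ definition above) =====
theorem allocate_seed_budgets_with_template_spec : Claim_equal_allocate_seed_budgets_with_template := by
  intro tb ss cq rt _
  unfold Spec_allocate_seed_budgets_with_template
  unfold allocate_seed_budgets_with_template allocate_seed_budgets_with_template_alt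
  by_cases h0 : ss.length = 0 ∨ tb ≤ 0
  · rw [if_pos h0, if_pos h0]
  · rw [if_neg h0, if_neg h0]
    have hn : 0 < ss.length := by
      rcases Nat.eq_zero_or_pos ss.length with h | h
      · exact absurd (Or.inl h) h0
      · exact h
    cases rt with
    | some t =>
      have hrtne : ¬ ((some t : Option (List Int)) = none ∧ ss.length = 5 ∧ tb = 50 ∧ cq = 9) := by
        simp
      rw [if_neg hrtne]
      simp only [pvA_branch]
      by_cases hval : t.length = ss.length ∧ t.sum = tb
      · have hbt : pvB_template tb ss cq (some t) = some t := by
          simp only [pvB_template]; rw [if_pos hval]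
        have hamt : pvB_amounts tb ss cq (some t) = t := by
          unfold pvB_amounts; rw [hbt]
        rw [if_pos hval, hamt]
      · have hbt : pvB_template tb ss cq (some t) = none := by
          simp only [pvB_template]; rw [if_neg hval]
        rw [if_neg hval]
        exact pv_rest_eq tb ss cq (some t) hn hbt
    | none =>
      by_cases hsp : ss.length = 5 ∧ tb = 50 ∧ cq = 9
      · have hcond : (none : Option (List Int)) = none ∧ ss.length = 5 ∧ tb = 50 ∧ cq = 9 :=
          ⟨rfl, hsp⟩
        rw [if_pos hcond]
        simp only [pvA_branch]
        have hval : pvTemplate.length = ss.length ∧ pvTemplate.sum = tb := by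
          constructor
          · rw [hsp.1]; rfl
          · rw [hsp.2.1]; rfl
        rw [if_pos hval]
        have hbt : pvB_template tb ss cq none = some pvTemplate := by
          simp only [pvB_template]; rw [if_pos hsp]
        have hamt : pvB_amounts tb ss cq none = pvTemplate := by
          unfold pvB_amounts; rw [hbt]
        rw [hamt]
      · have hcond : ¬ ((none : Option (List Int)) = none ∧ ss.length = 5 ∧ tb = 50 ∧ cq = 9) := by
          intro h; exact hsp h.2
        rw [if_neg hcond]
        simp only [pvA_branch]
        have hbt : pvB_template tb ss cq none = none := by
          simp only [pvB_template]; rw [if_neg hsp]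
        exact pv_rest_eq tb ss cq none hn hbt
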